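-- pv_equiv track=rewrite | github.com/auroua/zero_costs_nas_rs | nas/utils/search_space.py | get_paths_seq_aware
-- ===== SOURCE A (Python) =====
-- def get_paths_seq_aware(matrix, ops, num_vertices):
--     paths = []
--     paths_idx = []
--     for j in range(0, num_vertices):
--         paths.append([[]]) if matrix[0][j] else paths.append([])
--         paths_idx.append([[]]) if matrix[0][j] else paths_idx.append([])
--     for i in range(1, num_vertices - 1):
--         for j in range(1, num_vertices):
--             if matrix[i][j]:
--                 for ids, path in enumerate(paths[i]):
--                     paths[j].append([*path, ops[i]])
--                     paths_idx[j].append([*paths_idx[i][ids], i])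
--     return paths[-1], paths_idx[-1]
-- ===== SOURCE B (Python) =====
-- def get_paths_seq_aware(matrix, ops, num_vertices):
--     memo = {}
--
--     def paths_to(v):
--         if v in memo:
--             return memo[v]
--         if matrix[0][v]:
--             ps, idxs = [[]], [[]]
--         else:
--             ps, idxs = [], []
--         for i in range(1, v):
--             if matrix[i][v]:
--                 sp, si = paths_to(i)
--                 ps += [p + [ops[i]] for p in sp]
--                 idxs += [q + [i] for q in si]
--         memo[v] = (ps, idxs)
--         return ps, idxs
--
--     return paths_to(num_vertices - 1)
-- ===== Notes on version B (the rewrite author's own statement) =====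
-- stated objective: alternative
-- what changed: A fills mutable per-vertex path tables with a forward sweep over all (i,j) edge pairs; B instead defines paths_to(v) as a memoized recursion over v's predecessors (source empty path iff matrix[0][v], then each i in 1..v-1 with matrix[i][v] extends paths_to(i)) and returns paths_to(num_vertices-1).
-- outside the precondition, e.g. on get_paths_seq_aware([[1, 0, 0], [0, 1, 1]], ['a', 'b'], 3): A returns ([], []), B returns ([], []); on get_paths_seq_aware([[1, 0, 0], [0, 0, 0]], [], 3): A returns ([], []), B returns ([], [])
import Mathlib
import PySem

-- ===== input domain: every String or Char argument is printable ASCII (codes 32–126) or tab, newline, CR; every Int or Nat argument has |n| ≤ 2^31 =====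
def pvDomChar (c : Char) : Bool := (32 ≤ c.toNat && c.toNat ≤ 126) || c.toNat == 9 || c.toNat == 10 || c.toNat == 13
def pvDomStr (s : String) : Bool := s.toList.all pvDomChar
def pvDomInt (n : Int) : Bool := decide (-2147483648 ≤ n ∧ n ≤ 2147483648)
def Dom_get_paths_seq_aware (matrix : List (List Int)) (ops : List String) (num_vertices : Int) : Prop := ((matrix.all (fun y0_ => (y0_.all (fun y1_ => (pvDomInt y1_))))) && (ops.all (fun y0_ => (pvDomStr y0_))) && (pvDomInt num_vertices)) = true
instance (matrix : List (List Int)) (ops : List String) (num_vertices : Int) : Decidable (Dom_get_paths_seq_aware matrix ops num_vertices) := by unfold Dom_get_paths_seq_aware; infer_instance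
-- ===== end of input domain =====

-- B re-implements the forward DAG sweep as a memoized recursion over predecessors (objective: alternative decomposition, same cost).

-- ===== PORT A =====
-- matrix[i][j]; an out-of-range read yields the default 0/[] — such inputs are excluded by Pre_.
def pvAt (matrix : List (List Int)) (i j : Int) : Int :=
  PySem.List.pyGetD (PySem.List.pyGetD matrix i []) j 0

-- xs[j].append(x)
def pvAppendAt {α : Type} (xs : List (List α)) (j : Int) (x : α) : List (List α) :=
  xs.set j.toNat (PySem.List.pyGetD xs j [] ++ [x])

-- body of 'for ids, path in enumerate(paths[i]): paths[j].append(…); paths_idx[j].append(…)'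
def pvEnumStepA (ops : List String) (i j : Int)
    (st : List (List (List String)) × List (List (List Int))) (idp : Int × List String) :
    List (List (List String)) × List (List (List Int)) :=
  (pvAppendAt st.1 j (idp.2 ++ [PySem.List.pyGetD ops i ""]),
   pvAppendAt st.2 j (PySem.List.pyGetD (PySem.List.pyGetD st.2 i []) idp.1 [] ++ [i]))

-- body of 'for j in range(1, num_vertices)'
def pvInnerA (matrix : List (List Int)) (ops : List String) (i : Int)
    (st : List (List (List String)) × List (List (List Int))) (j : Int) :
    List (List (List String)) × List (List (List Int)) :=
  if pvAt matrix i j ≠ 0 then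
    (PySem.List.enumerate (PySem.List.pyGetD st.1 i [])).foldl (pvEnumStepA ops i j) st
  else st

-- body of 'for i in range(1, num_vertices - 1)'
def pvOuterA (matrix : List (List Int)) (ops : List String) (num_vertices : Int)
    (st : List (List (List String)) × List (List (List Int))) (i : Int) :
    List (List (List String)) × List (List (List Int)) :=
  (PySem.List.pyRange 1 num_vertices 1).foldl (pvInnerA matrix ops i) st

-- body of 'for j in range(0, num_vertices): paths.append(…); paths_idx.append(…)'
def pvInitA (matrix : List (List Int))
    (st : List (List (List String)) × List (List (List Int))) (j : Int) :
    List (List (List String)) × List (List (List Int)) :=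
  if pvAt matrix 0 j ≠ 0 then (st.1 ++ [[([] : List String)]], st.2 ++ [[([] : List Int)]])
  else (st.1 ++ [([] : List (List String))], st.2 ++ [([] : List (List Int))])

def get_paths_seq_aware (matrix : List (List Int)) (ops : List String) (num_vertices : Int) :
    List (List String) × List (List Int) :=
  let st0 := (PySem.List.pyRange 0 num_vertices 1).foldl (pvInitA matrix) ([], [])
  let stf := (PySem.List.pyRange 1 (num_vertices - 1) 1).foldl (pvOuterA matrix ops num_vertices) st0
  (PySem.List.pyGetD stf.1 (-1) [], PySem.List.pyGetD stf.2 (-1) [])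

-- ===== PORT B =====
-- paths_to(v): source paths iff matrix[0][v], then each predecessor i in 1..v-1 in ascending order.
def pvStepB (matrix : List (List Int)) (ops : List String)
    (tbl : List (List (List String) × List (List Int))) (v : Int) :
    List (List String) × List (List Int) :=
  let base : List (List String) × List (List Int) :=
    if pvAt matrix 0 v ≠ 0 then ([([] : List String)], [([] : List Int)]) else ([], [])
  (PySem.List.pyRange 1 v 1).foldl
    (fun acc i =>
      if pvAt matrix i v ≠ 0 then
        let sub := tbl.getD i.toNat ([], [])
        (acc.1 ++ sub.1.map (fun p => p ++ [PySem.List.pyGetD ops i ""]),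
         acc.2 ++ sub.2.map (fun q => q ++ [i]))
      else acc) base

-- the memo cache of Source B, realised as the table of paths_to(0), …, paths_to(n-1) filled bottom-up
def pvTableB (matrix : List (List Int)) (ops : List String) :
    Nat → List (List (List String) × List (List Int))
  | 0 => []
  | v + 1 => pvTableB matrix ops v ++ [pvStepB matrix ops (pvTableB matrix ops v) (v : Int)]

def get_paths_seq_aware_alt (matrix : List (List Int)) (ops : List String) (num_vertices : Int) :
    List (List String) × List (List Int) :=
  pvStepB matrix ops (pvTableB matrix ops (num_vertices - 1).toNat) (num_vertices - 1)

-- ===== PRECONDITION & SPEC =====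
-- Pre_ excludes inputs where A raises (num_vertices ≤ 0, or matrix/ops shorter than the indices the
-- loops touch) or loops forever (a self-loop matrix[i][i] ≠ 0 on an internal vertex reached by a path);
-- it conservatively also excludes self-loops on unreachable internal vertices and too-short ops lists
-- that are never actually indexed, where A does return (B returns the same values there).
def Pre_get_paths_seq_aware (matrix : List (List Int)) (ops : List String) (num_vertices : Int) : Prop :=
  1 ≤ num_vertices ∧
  max 1 (num_vertices - 1) ≤ (matrix.length : Int) ∧
  (∀ row ∈ matrix.take (max 1 (num_vertices - 1)).toNat, num_vertices ≤ (row.length : Int)) ∧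
  (3 ≤ num_vertices → num_vertices - 1 ≤ (ops.length : Int)) ∧
  (∀ i ∈ PySem.List.pyRange 1 (num_vertices - 1) 1, pvAt matrix i i = 0)

instance (matrix : List (List Int)) (ops : List String) (num_vertices : Int) :
    Decidable (Pre_get_paths_seq_aware matrix ops num_vertices) := by
  unfold Pre_get_paths_seq_aware; infer_instance

def pvWitness_get_paths_seq_aware : List (List Int) × List String × Int :=
  ([[0, 1, 1], [0, 0, 1]], ["a", "b"], 3)

def Spec_get_paths_seq_aware (matrix : List (List Int)) (ops : List String) (num_vertices : Int)
    (out : List (List String) × List (List Int)) : Prop :=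
  out = get_paths_seq_aware_alt matrix ops num_vertices

instance (matrix : List (List Int)) (ops : List String) (num_vertices : Int)
    (out : List (List String) × List (List Int)) :
    Decidable (Spec_get_paths_seq_aware matrix ops num_vertices out) := by
  unfold Spec_get_paths_seq_aware; infer_instance

-- ===== CLAIM (what is proved, stated in full; the proofs are below) =====
def Claim_equal_get_paths_seq_aware : Prop :=
  ∀ (matrix : List (List Int)) (ops : List String) (num_vertices : Int),
    Dom_get_paths_seq_aware matrix ops num_vertices →
    Pre_get_paths_seq_aware matrix ops num_vertices →
    Spec_get_paths_seq_aware matrix ops num_vertices (get_paths_seq_aware matrix ops num_vertices)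


-- ===== LEMMAS AND PROOFS =====

def pvDflt : List (List String) × List (List Int) := ([], [])

-- paths_to(v) as B computes it: step v evaluated on the memo table of all smaller vertices
def pvE (m : List (List Int)) (o : List String) (v : Nat) : List (List String) × List (List Int) :=
  pvStepB m o (pvTableB m o v) (v : Int)

def pvBase1 (m : List (List Int)) (j : Int) : List (List String) :=
  if pvAt m 0 j ≠ 0 then [[]] else []
def pvBase2 (m : List (List Int)) (j : Int) : List (List Int) :=
  if pvAt m 0 j ≠ 0 then [[]] else []

-- the block appended to paths[j] by outer iteration i (empty when there is no edge i→j)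
def pvExt1 (m : List (List Int)) (o : List String) (j i : Int) : List (List String) :=
  if pvAt m i j ≠ 0 then (pvE m o i.toNat).1.map (fun p => p ++ [PySem.List.pyGetD o i ""]) else []
def pvExt2 (m : List (List Int)) (o : List String) (j i : Int) : List (List Int) :=
  if pvAt m i j ≠ 0 then (pvE m o i.toNat).2.map (fun q => q ++ [i]) else []

-- contents of paths[j] after outer iterations 1..k-1
def pvF1 (m : List (List Int)) (o : List String) (j k : Int) : List (List String) :=
  pvBase1 m j ++ (PySem.List.pyRange 1 k 1).flatMap (pvExt1 m o j)
def pvF2 (m : List (List Int)) (o : List String) (j k : Int) : List (List Int) :=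
  pvBase2 m j ++ (PySem.List.pyRange 1 k 1).flatMap (pvExt2 m o j)

-- whole-table invariant (index 0 is never written after initialisation)
def pvH1 (m : List (List Int)) (o : List String) (k j : Int) : List (List String) :=
  if j = 0 then pvBase1 m j else pvF1 m o j k
def pvH2 (m : List (List Int)) (o : List String) (k j : Int) : List (List Int) :=
  if j = 0 then pvBase2 m j else pvF2 m o j k

theorem pvTableB_length (m : List (List Int)) (o : List String) (n : Nat) :
    (pvTableB m o n).length = n := by
  induction n with
  | zero => simp [pvTableB]
  | succ n ih => simp [pvTableB, ih]

theorem pvTableB_getD (m : List (List Int)) (o : List String) (n v : Nat) (h : v < n) :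
    (pvTableB m o n).getD v pvDflt = pvE m o v := by
  induction n with
  | zero => omega
  | succ n ih =>
    simp only [pvTableB]
    by_cases hv : v < n
    · rw [List.getD_eq_getElem?_getD, List.getElem?_append_left (by rw [pvTableB_length]; exact hv),
        ← List.getD_eq_getElem?_getD]
      exact ih hv
    · have hv' : v = n := by omega
      subst hv'
      rw [List.getD_eq_getElem?_getD,
        List.getElem?_append_right (by rw [pvTableB_length])]
      simp [pvTableB_length, pvE]

theorem pvStepB_eq (m : List (List Int)) (o : List String)
    (t : List (List (List String) × List (List Int))) (v : Int) :
    pvStepB m o t v =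
      (pvBase1 m v ++ (PySem.List.pyRange 1 v 1).flatMap
        (fun i => if pvAt m i v ≠ 0 then (t.getD i.toNat pvDflt).1.map (fun p => p ++ [PySem.List.pyGetD o i ""]) else []),
       pvBase2 m v ++ (PySem.List.pyRange 1 v 1).flatMap
        (fun i => if pvAt m i v ≠ 0 then (t.getD i.toNat pvDflt).2.map (fun q => q ++ [i]) else [])) := by
  have hbase : (if pvAt m 0 v ≠ 0 then (([([] : List String)] : List (List String)), ([([] : List Int)] : List (List Int))) else ([], []))
      = (pvBase1 m v, pvBase2 m v) := by unfold pvBase1 pvBase2; split_ifs <;> rfl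
  have hfun : (fun (acc : List (List String) × List (List Int)) (i : Int) =>
        if pvAt m i v ≠ 0 then
          (acc.1 ++ (t.getD i.toNat ([], [])).1.map (fun p => p ++ [PySem.List.pyGetD o i ""]),
           acc.2 ++ (t.getD i.toNat ([], [])).2.map (fun q => q ++ [i]))
        else acc)
      = (fun (acc : List (List String) × List (List Int)) (i : Int) =>
        (acc.1 ++ (if pvAt m i v ≠ 0 then (t.getD i.toNat pvDflt).1.map (fun p => p ++ [PySem.List.pyGetD o i ""]) else []),
         acc.2 ++ (if pvAt m i v ≠ 0 then (t.getD i.toNat pvDflt).2.map (fun q => q ++ [i]) else []))) := by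
    funext acc i
    split_ifs <;> simp [pvDflt]
  show (PySem.List.pyRange 1 v 1).foldl _ _ = _
  rw [hbase, hfun]
  rw [PySem.List.foldl_prod_mk
      (f := fun (acc : List (List String)) (i : Int) =>
        acc ++ (if pvAt m i v ≠ 0 then (t.getD i.toNat pvDflt).1.map (fun p => p ++ [PySem.List.pyGetD o i ""]) else []))
      (g := fun (acc : List (List Int)) (i : Int) =>
        acc ++ (if pvAt m i v ≠ 0 then (t.getD i.toNat pvDflt).2.map (fun q => q ++ [i]) else []))]
  rw [PySem.List.foldl_append_eq_flatMap, PySem.List.foldl_append_eq_flatMap]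

theorem pvE_fst (m : List (List Int)) (o : List String) (v : Nat) :
    (pvE m o v).1 = pvF1 m o (v : Int) (v : Int) := by
  unfold pvE
  rw [pvStepB_eq]
  unfold pvF1 pvExt1
  simp only
  congr 1
  rw [List.flatMap_def, List.flatMap_def]
  congr 1
  apply List.map_congr_left
  intro i hi
  have hm := PySem.List.mem_pyRange_one.mp hi
  have hlt : i.toNat < v := by omega
  rw [pvTableB_getD m o v i.toNat hlt]

theorem pvE_snd (m : List (List Int)) (o : List String) (v : Nat) :
    (pvE m o v).2 = pvF2 m o (v : Int) (v : Int) := by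
  unfold pvE
  rw [pvStepB_eq]
  unfold pvF2 pvExt2
  simp only
  congr 1
  rw [List.flatMap_def, List.flatMap_def]
  congr 1
  apply List.map_congr_left
  intro i hi
  have hm := PySem.List.mem_pyRange_one.mp hi
  have hlt : i.toNat < v := by omega
  rw [pvTableB_getD m o v i.toNat hlt]

theorem pvTableB_balanced (m : List (List Int)) (o : List String) (n : Nat) :
    ∀ p ∈ pvTableB m o n, p.1.length = p.2.length := by
  induction n with
  | zero => simp [pvTableB]
  | succ n ih =>
    intro p hp
    simp only [pvTableB, List.mem_append, List.mem_singleton] at hp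
    rcases hp with hp | hp
    · exact ih p hp
    · subst hp
      have hlen : ∀ i : Int,
          ((pvTableB m o n).getD i.toNat pvDflt).1.length
            = ((pvTableB m o n).getD i.toNat pvDflt).2.length := by
        intro i
        by_cases hi : i.toNat < (pvTableB m o n).length
        · rw [List.getD_eq_getElem _ _ hi]
          exact ih _ (List.getElem_mem hi)
        · rw [List.getD_eq_default _ _ (by omega)]
          rfl
      rw [pvStepB_eq]
      simp only [List.length_append, List.length_flatMap]
      have hbase : (pvBase1 m n).length = (pvBase2 m n).length := by
        unfold pvBase1 pvBase2; split_ifs <;> rfl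
      have hmap : ((PySem.List.pyRange 1 (n : Int) 1).map
            (fun i => (if pvAt m i (n : Int) ≠ 0 then ((pvTableB m o n).getD i.toNat pvDflt).1.map (fun p => p ++ [PySem.List.pyGetD o i ""]) else []).length))
          = ((PySem.List.pyRange 1 (n : Int) 1).map
            (fun i => (if pvAt m i (n : Int) ≠ 0 then ((pvTableB m o n).getD i.toNat pvDflt).2.map (fun q => q ++ [i]) else []).length)) := by
        apply List.map_congr_left
        intro i _
        split_ifs with hc
        · simp only [List.length_map]
          exact hlen i
        · rfl
      rw [hbase, hmap]

theorem pvE_len (m : List (List Int)) (o : List String) (v : Nat) :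
    (pvE m o v).1.length = (pvE m o v).2.length := by
  have hmem : pvE m o v ∈ pvTableB m o (v + 1) := by
    simp only [pvTableB, List.mem_append, List.mem_singleton]
    exact Or.inr rfl
  exact pvTableB_balanced m o (v + 1) _ hmem

theorem pvSet_map {α : Type} (f : Int → α) (nv j : Int) (h0 : 0 ≤ j) (_h1 : j < nv) (y : α) :
    ((PySem.List.pyRange 0 nv 1).map f).set j.toNat y
      = (PySem.List.pyRange 0 nv 1).map (fun t => if t = j then y else f t) := by
  apply List.ext_getElem
  · simp
  intro k hk1 hk2
  have hk : k < (nv - 0).toNat := by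
    simpa [PySem.List.length_pyRange_one] using hk2
  simp only [List.getElem_set, List.getElem_map, PySem.List.getElem_pyRange_one, zero_add]
  split_ifs with hA hB hB
  · rfl
  · exfalso; omega
  · exfalso; omega
  · rfl

theorem pvRead_map {α : Type} (f : Int → α) (nv t : Int) (d : α) (h0 : 0 ≤ t) (h1 : t < nv) :
    PySem.List.pyGetD ((PySem.List.pyRange 0 nv 1).map f) t d = f t := by
  exact PySem.List.pyGetD_map_pyRange_of_nonneg f nv t d h0 h1

theorem pvAppendAt_map {α : Type} (f : Int → List α) (nv j : Int) (h0 : 0 ≤ j) (h1 : j < nv) (x : α) :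
    pvAppendAt ((PySem.List.pyRange 0 nv 1).map f) j x
      = (PySem.List.pyRange 0 nv 1).map (fun t => if t = j then f j ++ [x] else f t) := by
  unfold pvAppendAt
  rw [pvRead_map f nv j [] h0 h1, pvSet_map f nv j h0 h1]

theorem pvEnumFold (o : List String) (nv j k : Int)
    (h0j : 0 ≤ j) (hjn : j < nv) (h0k : 0 ≤ k) (hkn : k < nv) (hjk : j ≠ k)
    (lst : List (List String)) :
    ∀ (s : Int) (f1 : Int → List (List String)) (f2 : Int → List (List Int)),
    (PySem.List.enumerate lst s).foldl (pvEnumStepA o k j)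
      ((PySem.List.pyRange 0 nv 1).map f1, (PySem.List.pyRange 0 nv 1).map f2)
    = ((PySem.List.pyRange 0 nv 1).map
        (fun t => if t = j then f1 j ++ lst.map (fun p => p ++ [PySem.List.pyGetD o k ""]) else f1 t),
       (PySem.List.pyRange 0 nv 1).map
        (fun t => if t = j then
            f2 j ++ (PySem.List.pyRange s (s + lst.length) 1).map
              (fun ids => PySem.List.pyGetD (f2 k) ids [] ++ [k])
          else f2 t)) := by
  induction lst with
  | nil =>
    intro s f1 f2
    simp only [PySem.List.enumerate_nil, List.foldl_nil, List.length_nil, Nat.cast_zero,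
      add_zero, List.map_nil, List.append_nil]
    rw [PySem.List.pyRange_one_eq_nil (le_refl s)]
    simp only [List.map_nil, List.append_nil]
    refine Prod.ext ?_ ?_ <;>
    · apply List.map_congr_left
      intro t _
      split_ifs with h
      · rw [h]
      · rfl
  | cons x xs ih =>
    intro s f1 f2
    rw [PySem.List.enumerate_cons]
    simp only [List.foldl_cons]
    have hstep : pvEnumStepA o k j
        ((PySem.List.pyRange 0 nv 1).map f1, (PySem.List.pyRange 0 nv 1).map f2) (s, x)
        = ((PySem.List.pyRange 0 nv 1).map
            (fun t => if t = j then f1 j ++ [x ++ [PySem.List.pyGetD o k ""]] else f1 t),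
           (PySem.List.pyRange 0 nv 1).map
            (fun t => if t = j then f2 j ++ [PySem.List.pyGetD (f2 k) s [] ++ [k]] else f2 t)) := by
      unfold pvEnumStepA
      simp only
      rw [pvRead_map f2 nv k [] h0k hkn]
      rw [pvAppendAt_map f1 nv j h0j hjn, pvAppendAt_map f2 nv j h0j hjn]
    rw [hstep]
    rw [ih (s + 1)
        (fun t => if t = j then f1 j ++ [x ++ [PySem.List.pyGetD o k ""]] else f1 t)
        (fun t => if t = j then f2 j ++ [PySem.List.pyGetD (f2 k) s [] ++ [k]] else f2 t)]
    have hkj : ¬ (k = j) := fun h => hjk h.symm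
    have hlt : s < s + ((x :: xs).length : Int) := by simp
    refine Prod.ext ?_ ?_ <;> (apply List.map_congr_left; intro t _)
    · by_cases ht : t = j
      · simp [ht, List.append_assoc]
      · simp [ht]
    · by_cases ht : t = j
      · simp only [ht]
        rw [PySem.List.pyRange_one_cons hlt]
        simp [hkj, List.append_assoc]
        all_goals ring_nf
      · simp [ht]

theorem pvF1_succ (m : List (List Int)) (o : List String) (j k : Int) (h : 1 ≤ k) :
    pvF1 m o j (k + 1) = pvF1 m o j k ++ pvExt1 m o j k := by
  unfold pvF1
  rw [PySem.List.pyRange_one_succ_right (by omega : (1 : Int) ≤ k), List.flatMap_append]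
  simp

theorem pvF2_succ (m : List (List Int)) (o : List String) (j k : Int) (h : 1 ≤ k) :
    pvF2 m o j (k + 1) = pvF2 m o j k ++ pvExt2 m o j k := by
  unfold pvF2
  rw [PySem.List.pyRange_one_succ_right (by omega : (1 : Int) ≤ k), List.flatMap_append]
  simp

theorem pvInner_spec (m : List (List Int)) (o : List String) (nv k : Int)
    (h1k : 1 ≤ k) (hk : k ≤ nv - 2) (hdiag : pvAt m k k = 0) :
    ∀ (n : Nat), (1 + (n : Int)) ≤ nv →
    (PySem.List.pyRange 1 (1 + (n : Int)) 1).foldl (pvInnerA m o k)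
      ((PySem.List.pyRange 0 nv 1).map (pvH1 m o k), (PySem.List.pyRange 0 nv 1).map (pvH2 m o k))
    = ((PySem.List.pyRange 0 nv 1).map
         (fun t => if 1 ≤ t ∧ t < 1 + (n : Int) then pvH1 m o (k + 1) t else pvH1 m o k t),
       (PySem.List.pyRange 0 nv 1).map
         (fun t => if 1 ≤ t ∧ t < 1 + (n : Int) then pvH2 m o (k + 1) t else pvH2 m o k t)) := by
  intro n
  induction n with
  | zero =>
    intro _
    simp only [Nat.cast_zero, add_zero]
    rw [PySem.List.pyRange_one_eq_nil (by omega : (1 : Int) ≤ 1)]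
    simp only [List.foldl_nil]
    refine Prod.ext ?_ ?_ <;>
    · apply List.map_congr_left
      intro t _
      split_ifs with h
      · exact absurd h (by omega)
      · rfl
  | succ n ih =>
    intro hn
    have hnn : (((n : Nat) + 1 : Nat) : Int) = (n : Int) + 1 := by push_cast; ring
    rw [hnn] at hn ⊢
    have hn' : 1 + (n : Int) ≤ nv := by omega
    have hJ1 : (1 : Int) ≤ 1 + (n : Int) := by omega
    have hJn : 1 + (n : Int) < nv := by omega
    have h0k : (0 : Int) ≤ k := by omega
    have hkn : k < nv := by omega
    rw [show (1 : Int) + ((n : Int) + 1) = (1 + (n : Int)) + 1 by ring,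
      PySem.List.pyRange_one_succ_right hJ1, List.foldl_append, ih hn']
    simp only [List.foldl_cons, List.foldl_nil]
    unfold pvInnerA
    set J : Int := 1 + (n : Int) with hJdef
    set g1 : Int → List (List String) :=
      fun t => if 1 ≤ t ∧ t < J then pvH1 m o (k + 1) t else pvH1 m o k t with hg1def
    set g2 : Int → List (List Int) :=
      fun t => if 1 ≤ t ∧ t < J then pvH2 m o (k + 1) t else pvH2 m o k t with hg2def
    have hg1k : g1 k = pvF1 m o k k := by
      rw [hg1def]
      simp only
      have hk0 : ¬ (k = 0) := by omega
      split_ifs with h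
      · rw [pvH1, if_neg hk0, pvF1_succ m o k k h1k, pvExt1, if_neg (by simp [hdiag]), List.append_nil]
      · rw [pvH1, if_neg hk0]
    have hg2k : g2 k = pvF2 m o k k := by
      rw [hg2def]
      simp only
      have hk0 : ¬ (k = 0) := by omega
      split_ifs with h
      · rw [pvH2, if_neg hk0, pvF2_succ m o k k h1k, pvExt2, if_neg (by simp [hdiag]), List.append_nil]
      · rw [pvH2, if_neg hk0]
    have hcast : ((k.toNat : Nat) : Int) = k := Int.toNat_of_nonneg h0k
    have hE1 : (pvE m o k.toNat).1 = pvF1 m o k k := by rw [pvE_fst, hcast]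
    have hE2 : (pvE m o k.toNat).2 = pvF2 m o k k := by rw [pvE_snd, hcast]
    by_cases hedge : pvAt m k J ≠ 0
    · rw [if_pos hedge]
      have hJk : J ≠ k := by
        intro h
        exact hedge (by rw [h] at hedge ⊢; exact hdiag)
      simp only
      rw [pvRead_map g1 nv k [] h0k hkn, hg1k]
      rw [pvEnumFold o nv J k (by omega) hJn h0k hkn hJk (pvF1 m o k k) 0 g1 g2]
      have hlen : ((pvF1 m o k k).length : Int) = ((pvF2 m o k k).length : Int) := by
        rw [← hE1, ← hE2]
        exact_mod_cast congrArg Nat.cast (pvE_len m o k.toNat)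
      refine Prod.ext ?_ ?_ <;> (apply List.map_congr_left; intro t ht)
      · by_cases htJ : t = J
        · rw [htJ, if_pos rfl, if_pos (by omega)]
          rw [hg1def]
          simp only
          rw [if_neg (by omega), pvH1, if_neg (by omega), pvH1, if_neg (by omega)]
          rw [pvF1_succ m o J k h1k, pvExt1, if_pos hedge, hE1]
        · rw [if_neg htJ]
          rw [hg1def]
          simp only
          by_cases h1t : 1 ≤ t ∧ t < J
          · rw [if_pos h1t, if_pos (by omega)]
          · rw [if_neg h1t, if_neg (by omega)]
      · by_cases htJ : t = J
        · rw [htJ, if_pos rfl, if_pos (by omega)]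
          rw [zero_add, hg2k]
          rw [show (fun ids => PySem.List.pyGetD (pvF2 m o k k) ids [] ++ [k])
              = ((fun q => q ++ [k]) ∘ (fun ids => PySem.List.pyGetD (pvF2 m o k k) ids []))
            from rfl]
          rw [show ((pvF1 m o k k).length : Int) = ((pvF2 m o k k).length : Int) from hlen]
          rw [← List.map_map, PySem.List.map_pyGetD_pyRange_zero']
          rw [hg2def]
          simp only
          rw [if_neg (by omega), pvH2, if_neg (by omega), pvH2, if_neg (by omega)]
          rw [pvF2_succ m o J k h1k, pvExt2, if_pos hedge, hE2]
        · rw [if_neg htJ]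
          rw [hg2def]
          simp only
          by_cases h1t : 1 ≤ t ∧ t < J
          · rw [if_pos h1t, if_pos (by omega)]
          · rw [if_neg h1t, if_neg (by omega)]
    · rw [if_neg hedge]
      have hedge0 : pvAt m k J = 0 := by
        by_contra hc
        exact hedge hc
      refine Prod.ext ?_ ?_ <;> (apply List.map_congr_left; intro t ht)
      · by_cases htJ : t = J
        · rw [htJ]
          rw [hg1def]
          simp only
          rw [if_neg (by omega), if_pos (by omega), pvH1, if_neg (by omega), pvH1, if_neg (by omega)]
          rw [pvF1_succ m o J k h1k, pvExt1, if_neg (by simp [hedge0]), List.append_nil]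
        · rw [hg1def]
          simp only
          by_cases h1t : 1 ≤ t ∧ t < J
          · rw [if_pos h1t, if_pos (by omega)]
          · rw [if_neg h1t, if_neg (by omega)]
      · by_cases htJ : t = J
        · rw [htJ]
          rw [hg2def]
          simp only
          rw [if_neg (by omega), if_pos (by omega), pvH2, if_neg (by omega), pvH2, if_neg (by omega)]
          rw [pvF2_succ m o J k h1k, pvExt2, if_neg (by simp [hedge0]), List.append_nil]
        · rw [hg2def]
          simp only
          by_cases h1t : 1 ≤ t ∧ t < J
          · rw [if_pos h1t, if_pos (by omega)]
          · rw [if_neg h1t, if_neg (by omega)]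

theorem pvOuterA_spec (m : List (List Int)) (o : List String) (nv k : Int)
    (h1k : 1 ≤ k) (hk : k ≤ nv - 2) (hdiag : pvAt m k k = 0) :
    pvOuterA m o nv ((PySem.List.pyRange 0 nv 1).map (pvH1 m o k), (PySem.List.pyRange 0 nv 1).map (pvH2 m o k)) k
    = ((PySem.List.pyRange 0 nv 1).map (pvH1 m o (k + 1)), (PySem.List.pyRange 0 nv 1).map (pvH2 m o (k + 1))) := by
  unfold pvOuterA
  have hcast : (((nv - 1).toNat : Nat) : Int) = nv - 1 := Int.toNat_of_nonneg (by omega)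
  have hbound : (1 : Int) + ((nv - 1).toNat : Int) = nv := by omega
  have := pvInner_spec m o nv k h1k hk hdiag (nv - 1).toNat (by omega)
  rw [hbound] at this
  rw [this]
  refine Prod.ext ?_ ?_ <;> (apply List.map_congr_left; intro t ht)
  · have hmem := PySem.List.mem_pyRange_one.mp ht
    by_cases ht0 : t = 0
    · rw [if_neg (by omega), ht0, pvH1, if_pos rfl, pvH1, if_pos rfl]
    · rw [if_pos (by omega)]
  · have hmem := PySem.List.mem_pyRange_one.mp ht
    by_cases ht0 : t = 0
    · rw [if_neg (by omega), ht0, pvH2, if_pos rfl, pvH2, if_pos rfl]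
    · rw [if_pos (by omega)]

theorem pvInit_spec (m : List (List Int)) (o : List String) (nv : Int) :
    (PySem.List.pyRange 0 nv 1).foldl (pvInitA m) ([], [])
      = ((PySem.List.pyRange 0 nv 1).map (pvH1 m o 1), (PySem.List.pyRange 0 nv 1).map (pvH2 m o 1)) := by
  have hfun : pvInitA m
      = (fun (st : List (List (List String)) × List (List (List Int))) (j : Int) =>
        (st.1 ++ [pvBase1 m j], st.2 ++ [pvBase2 m j])) := by
    funext st j
    unfold pvInitA pvBase1 pvBase2
    split_ifs <;> rfl
  rw [hfun]
  rw [PySem.List.foldl_prod_mk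
      (f := fun (st : List (List (List String))) (j : Int) => st ++ [pvBase1 m j])
      (g := fun (st : List (List (List Int))) (j : Int) => st ++ [pvBase2 m j])]
  rw [PySem.List.foldl_append_singleton_eq_map, PySem.List.foldl_append_singleton_eq_map]
  simp only [List.nil_append]
  refine Prod.ext ?_ ?_ <;>
  · apply List.map_congr_left
    intro j _
    simp only [pvH1, pvH2, pvF1, pvF2]
    rw [PySem.List.pyRange_one_eq_nil (by omega : (1:Int) ≤ 1)]
    split_ifs <;> simp

theorem pvOuterFold_spec (m : List (List Int)) (o : List String) (nv : Int)
    (hdiag : ∀ i ∈ PySem.List.pyRange 1 (nv - 1) 1, pvAt m i i = 0) :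
    ∀ (n : Nat), (1 + (n : Int)) ≤ nv - 1 →
    (PySem.List.pyRange 1 (1 + (n : Int)) 1).foldl (pvOuterA m o nv)
      ((PySem.List.pyRange 0 nv 1).map (pvH1 m o 1), (PySem.List.pyRange 0 nv 1).map (pvH2 m o 1))
    = ((PySem.List.pyRange 0 nv 1).map (pvH1 m o (1 + (n : Int))), (PySem.List.pyRange 0 nv 1).map (pvH2 m o (1 + (n : Int)))) := by
  intro n
  induction n with
  | zero =>
    intro _
    simp only [Nat.cast_zero, add_zero]
    rw [PySem.List.pyRange_one_eq_nil (by omega : (1 : Int) ≤ 1)]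
    simp only [List.foldl_nil]
  | succ n ih =>
    intro hn
    have hnn : (((n : Nat) + 1 : Nat) : Int) = (n : Int) + 1 := by push_cast; ring
    rw [hnn] at hn ⊢
    have hn' : 1 + (n : Int) ≤ nv - 1 := by omega
    rw [show (1 : Int) + ((n : Int) + 1) = (1 + (n : Int)) + 1 by ring,
      PySem.List.pyRange_one_succ_right (by omega : (1 : Int) ≤ 1 + (n : Int)),
      List.foldl_append, ih hn']
    simp only [List.foldl_cons, List.foldl_nil]
    exact pvOuterA_spec m o nv (1 + (n : Int)) (by omega) (by omega)
      (hdiag _ (PySem.List.mem_pyRange_one.mpr (by omega)))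

theorem pvGetD_map_neg_one {α : Type} (f : Int → α) (nv : Int) (d : α) (h : 1 ≤ nv) :
    PySem.List.pyGetD ((PySem.List.pyRange 0 nv 1).map f) (-1) d = f (nv - 1) := by
  obtain ⟨b, rfl⟩ : ∃ b, nv = b + 1 := ⟨nv - 1, by ring⟩
  rw [PySem.List.pyRange_one_succ_right (by omega : (0 : Int) ≤ b), List.map_append]
  simp [PySem.List.pyGetD, PySem.List.pyGet?_neg_one_append_singleton]

-- ===== VERDICT (by name: the statement is the Claim_ definition above) =====
theorem get_paths_seq_aware_spec : Claim_equal_get_paths_seq_aware := by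
  intro matrix ops nv _hdom hpre
  obtain ⟨h1, _h2, _h3, _h4, h5⟩ := hpre
  unfold Spec_get_paths_seq_aware get_paths_seq_aware get_paths_seq_aware_alt
  simp only
  rw [pvInit_spec matrix ops nv]
  have hcast : (((nv - 1).toNat : Nat) : Int) = nv - 1 := Int.toNat_of_nonneg (by omega)
  have halt : pvStepB matrix ops (pvTableB matrix ops (nv - 1).toNat) (nv - 1)
      = pvE matrix ops (nv - 1).toNat := by
    unfold pvE
    rw [hcast]
  rw [halt]
  by_cases hnv : nv = 1
  · subst hnv
    rw [PySem.List.pyRange_one_eq_nil (by omega : (1 : Int) - 1 ≤ 1)]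
    simp only [List.foldl_nil]
    rw [pvGetD_map_neg_one _ 1 _ (by omega), pvGetD_map_neg_one _ 1 _ (by omega)]
    refine Prod.ext ?_ ?_
    · rw [pvE_fst]
      norm_num
      rw [pvH1, if_pos rfl, pvF1, PySem.List.pyRange_one_eq_nil (by omega : (0:Int) ≤ 1),
        List.flatMap_nil, List.append_nil]
    · rw [pvE_snd]
      norm_num
      rw [pvH2, if_pos rfl, pvF2, PySem.List.pyRange_one_eq_nil (by omega : (0:Int) ≤ 1),
        List.flatMap_nil, List.append_nil]
  · have hge2 : 2 ≤ nv := by omega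
    have hb : nv - 1 = 1 + (((nv - 2).toNat : Nat) : Int) := by omega
    rw [show PySem.List.pyRange 1 (nv - 1) 1 = PySem.List.pyRange 1 (1 + (((nv - 2).toNat : Nat) : Int)) 1
      from by rw [← hb]]
    rw [pvOuterFold_spec matrix ops nv h5 (nv - 2).toNat (by omega)]
    rw [pvGetD_map_neg_one _ nv _ (by omega), pvGetD_map_neg_one _ nv _ (by omega)]
    rw [← hb]
    refine Prod.ext ?_ ?_
    · rw [pvE_fst, hcast, pvH1, if_neg (by omega)]
    · rw [pvE_snd, hcast, pvH2, if_neg (by omega)]
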